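-- pv_equiv track=rewrite | github.com/ecolabdata/ecospheres-metadata | src/dcat_reader_ckan.py | define_geo_coverage
-- ===== SOURCE A (Python) =====
-- def define_geo_coverage(insee_uris: list) -> str:
--     """
--     Map a list or INSEE URI to a spatial coverage : 'departemental' or 'intra-departemental'
--     """
--     communes = 0
--     departements = 0
--     for insee_uri in insee_uris:
--         if 'commune' in insee_uri:
--             communes += 1
--         elif 'departement' in insee_uri:
--             departements += 1
--     if communes >= 1:
--         return 'Communale'
--     elif departements >= 1:
--         return 'Départementale'
--     else:
--         return None
-- ===== SOURCE B (Python) =====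
-- def define_geo_coverage(insee_uris: list) -> str:
--     """
--     Map a list of INSEE URIs to a spatial coverage, by two short-circuiting
--     presence checks instead of counting both categories in one pass.
--     """
--     if any('commune' in u for u in insee_uris):
--         return 'Communale'
--     if any('departement' in u for u in insee_uris):
--         return 'Départementale'
--     return None
-- ===== Notes on version B (the rewrite author's own statement) =====
-- stated objective: simpler
-- what changed: Replaced the single counting loop with two counters and threshold tests by two short-circuiting any() presence checks (commune first, then departement).
import Mathlib
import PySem

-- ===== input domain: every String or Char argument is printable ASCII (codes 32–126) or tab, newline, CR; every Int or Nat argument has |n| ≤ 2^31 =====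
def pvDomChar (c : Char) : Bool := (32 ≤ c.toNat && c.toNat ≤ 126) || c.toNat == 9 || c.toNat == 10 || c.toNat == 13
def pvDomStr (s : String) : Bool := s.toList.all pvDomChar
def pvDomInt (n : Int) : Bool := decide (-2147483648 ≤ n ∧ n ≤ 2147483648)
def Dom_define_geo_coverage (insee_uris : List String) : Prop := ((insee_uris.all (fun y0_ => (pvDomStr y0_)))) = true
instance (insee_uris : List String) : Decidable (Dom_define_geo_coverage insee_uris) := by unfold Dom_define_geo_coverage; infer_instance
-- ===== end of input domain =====

-- B replaces A's single counting loop (two counters, thresholds) by two short-circuiting existence checks; objective: simpler.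


-- ===== PORT A =====
def define_geo_coverage (insee_uris : List String) : Option String :=
  let st := insee_uris.foldl (fun (p : Nat × Nat) insee_uri =>
    if PySem.Str.isIn "commune" insee_uri then (p.1 + 1, p.2)
    else if PySem.Str.isIn "departement" insee_uri then (p.1, p.2 + 1)
    else p) (0, 0)
  if st.1 ≥ 1 then some "Communale"
  else if st.2 ≥ 1 then some "Départementale"
  else none

-- ===== PORT B =====
def define_geo_coverage_alt (insee_uris : List String) : Option String :=
  if insee_uris.any (fun u => PySem.Str.isIn "commune" u) then some "Communale"
  else if insee_uris.any (fun u => PySem.Str.isIn "departement" u) then some "Départementale"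
  else none

-- ===== PRECONDITION & SPEC =====
def Spec_define_geo_coverage (insee_uris : List String) (out : Option String) : Prop := out = define_geo_coverage_alt insee_uris
instance (insee_uris : List String) (out : Option String) : Decidable (Spec_define_geo_coverage insee_uris out) := by unfold Spec_define_geo_coverage; infer_instance

-- ===== CLAIM (what is proved, stated in full; the proofs are below) =====
def Claim_equal_define_geo_coverage : Prop := ∀ (insee_uris : List String), Dom_define_geo_coverage insee_uris → Spec_define_geo_coverage insee_uris (define_geo_coverage insee_uris)

-- ===== LEMMAS AND PROOFS =====
-- A's loop computes, from any start (c, d): c + #{commune uris}, d + #{departement-but-not-commune uris}.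
theorem pv_loop_char (l : List String) (c d : Nat) :
    l.foldl (fun (p : Nat × Nat) insee_uri =>
      if PySem.Str.isIn "commune" insee_uri then (p.1 + 1, p.2)
      else if PySem.Str.isIn "departement" insee_uri then (p.1, p.2 + 1)
      else p) (c, d)
    = (c + l.countP (fun u => PySem.Str.isIn "commune" u),
       d + l.countP (fun u => !PySem.Str.isIn "commune" u && PySem.Str.isIn "departement" u)) := by
  induction l generalizing c d with
  | nil => simp
  | cons x xs ih =>
    rw [List.foldl_cons, List.countP_cons, List.countP_cons]
    by_cases h : PySem.Str.isIn "commune" x = true <;>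
      by_cases h2 : PySem.Str.isIn "departement" x = true <;>
        simp only [h, h2, if_true, if_false, Bool.false_eq_true] <;>
        · rw [ih]
          refine Prod.ext ?_ ?_ <;> simp [h, h2] <;> omega

-- ===== VERDICT (by name: the statement is the Claim_ definition above) =====
theorem define_geo_coverage_spec : Claim_equal_define_geo_coverage := by
  intro l _
  unfold Spec_define_geo_coverage define_geo_coverage define_geo_coverage_alt
  rw [pv_loop_char]
  simp only [Nat.zero_add]
  by_cases hc : l.any (fun u => PySem.Str.isIn "commune" u) = true
  · have hpos : l.countP (fun u => PySem.Str.isIn "commune" u) ≥ 1 := by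
      rcases List.any_eq_true.mp hc with ⟨x, hx, hpx⟩
      refine Nat.one_le_iff_ne_zero.mpr (fun h => ?_)
      have := List.countP_eq_zero.mp h x hx
      rw [hpx] at this; exact this rfl
    rw [if_pos hpos, if_pos hc]
  · have h0 : l.countP (fun u => PySem.Str.isIn "commune" u) = 0 := by
      refine List.countP_eq_zero.mpr (fun x hx hpx => ?_)
      exact hc (List.any_eq_true.mpr ⟨x, hx, hpx⟩)
    have hall : ∀ x ∈ l, PySem.Str.isIn "commune" x = false := by
      intro x hx
      cases h : PySem.Str.isIn "commune" x
      · rfl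
      · exact absurd (List.any_eq_true.mpr ⟨x, hx, h⟩) hc
    have heq : l.countP (fun u => !PySem.Str.isIn "commune" u && PySem.Str.isIn "departement" u)
        = l.countP (fun u => PySem.Str.isIn "departement" u) := by
      refine List.countP_congr (fun x hx => ?_)
      rw [hall x hx]; rfl
    rw [if_neg (by omega : ¬ l.countP (fun u => PySem.Str.isIn "commune" u) ≥ 1),
        if_neg hc, heq]
    by_cases hd : l.any (fun u => PySem.Str.isIn "departement" u) = true
    · have hpos : l.countP (fun u => PySem.Str.isIn "departement" u) ≥ 1 := by
        rcases List.any_eq_true.mp hd with ⟨x, hx, hpx⟩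
        refine Nat.one_le_iff_ne_zero.mpr (fun h => ?_)
        have := List.countP_eq_zero.mp h x hx
        rw [hpx] at this; exact this rfl
      rw [if_pos hpos, if_pos hd]
    · have h0d : l.countP (fun u => PySem.Str.isIn "departement" u) = 0 := by
        refine List.countP_eq_zero.mpr (fun x hx hpx => ?_)
        exact hd (List.any_eq_true.mpr ⟨x, hx, hpx⟩)
      rw [if_neg (by omega : ¬ l.countP (fun u => PySem.Str.isIn "departement" u) ≥ 1),
          if_neg hd]
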